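-- pv_equiv track=rewrite | github.com/ars667/Krust69 | incident.py | kirch_to_incident
-- ===== SOURCE A (Python) =====
-- def kirch_to_incident(n):  # из матрицы Кирхгофа в матрицу инцидентности
--     a = 0
--     b = len(n)
--     for i in range(len(n)):
--         for j in range(len(n)):
--             if i != j and n[i][j]:
--                 a += 1
--     a //= 2
--     x = [[0 for i in range(a)] for j in range(b)]
--     curr_rib = 0
--     for i in range(len(n)):
--         for j in range(len(n)):
--             if n[i][j] and i != j:
--                 x[j][curr_rib], x[i][curr_rib] = 1, 1
--                 n[i][j], n[j][i] = 0, 0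
--                 curr_rib += 1
--     return x
-- ===== SOURCE B (Python) =====
-- def kirch_to_incident(n):  # entry-wise formula over the upper-triangle edge list; does NOT mutate n (A zeroes consumed entries)
--     b = len(n)
--     edges = [(i, j) for i in range(b) for j in range(i + 1, b) if n[i][j]]
--     return [[int(v == i or v == j) for (i, j) in edges] for v in range(b)]
-- ===== Notes on version B (the rewrite author's own statement) =====
-- stated objective: alternative
-- what changed: A counts off-diagonal nonzeros, halves, allocates a V x E zero matrix and fills it by index assignment in a second full double scan that dedups edges by zeroing symmetric entries of n in place; B collects the upper-triangle edge list once and computes every matrix entry directly by the closed formula int(v == i or v == j), with no allocation, no counter, no assignment and no mutation of n.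
import Mathlib
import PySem

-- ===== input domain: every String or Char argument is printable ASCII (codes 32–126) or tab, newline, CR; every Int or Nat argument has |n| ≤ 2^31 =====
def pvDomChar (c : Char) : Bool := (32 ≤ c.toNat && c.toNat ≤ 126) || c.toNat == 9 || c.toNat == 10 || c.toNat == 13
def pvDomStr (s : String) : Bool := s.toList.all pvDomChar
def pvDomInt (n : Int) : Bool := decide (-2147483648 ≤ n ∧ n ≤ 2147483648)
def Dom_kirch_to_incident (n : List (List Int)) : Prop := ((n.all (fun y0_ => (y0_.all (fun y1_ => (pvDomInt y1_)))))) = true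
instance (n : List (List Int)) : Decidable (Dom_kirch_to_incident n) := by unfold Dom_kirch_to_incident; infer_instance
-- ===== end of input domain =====

-- B computes every incidence-matrix entry by the closed formula int(v == i or v == j) over the
-- upper-triangle edge list, instead of A's count/allocate/assign double scans (same asymptotic cost).
-- A mutates its argument (zeroes the entries of every consumed edge) and B does not; the
-- equivalence proved here is about the RETURN value only.

-- matrix read/write helpers (Python's m[i][j] read and m[i][j] = v write, indices in range)
def mget (m : List (List Int)) (i j : Nat) : Int := (m.getD i []).getD j 0

def mset (m : List (List Int)) (i j : Nat) (v : Int) : List (List Int) :=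
  m.set i ((m.getD i []).set j v)

-- ===== PORT A =====
-- Python's `a` is a nonnegative counter, `a //= 2` is Nat division; the IndexError Python raises
-- when curr_rib runs past the allocated columns (asymmetric support) is excluded by Pre_.
def kirch_to_incident (n : List (List Int)) : List (List Int) :=
  let b := n.length
  let a := (List.range b).foldl (fun a i => (List.range b).foldl
      (fun a j => if i ≠ j ∧ mget n i j ≠ 0 then a + 1 else a) a) (0 : Nat)
  let a := a / 2
  let x := List.replicate b (List.replicate a (0 : Int))
  ((List.range b).foldl (fun s i => (List.range b).foldl
      (fun (s : List (List Int) × List (List Int) × Nat) j =>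
        if mget s.2.1 i j ≠ 0 ∧ i ≠ j then
          (mset (mset s.1 j s.2.2 1) i s.2.2 1, mset (mset s.2.1 i j 0) j i 0, s.2.2 + 1)
        else s) s) (x, n, 0)).1

-- ===== PORT B =====
-- `range(i+1, b)` is `List.range' (i+1) (b-(i+1))`; the two comprehensions are the flatMap/filter/map
-- and map/map below; `int(v == i or v == j)` is the if-then-else formula.
def kirch_to_incident_alt (n : List (List Int)) : List (List Int) :=
  let b := n.length
  let edges := (List.range b).flatMap (fun i =>
      ((List.range' (i + 1) (b - (i + 1))).filter (fun j => decide (mget n i j ≠ 0))).map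
        (fun j => (i, j)))
  (List.range b).map (fun v =>
    edges.map (fun p => if v = p.1 ∨ v = p.2 then (1 : Int) else 0))

-- ===== PRECONDITION & SPEC =====
-- Pre_ = exactly the inputs on which Python's A returns: every row reaches length len(n)
-- (else n[i][j] raises IndexError) and the off-diagonal nonzero support is symmetric
-- (else the halved count under-allocates columns and x[j][curr_rib] raises IndexError).
def Pre_kirch_to_incident (n : List (List Int)) : Prop :=
  (∀ row ∈ n, n.length ≤ row.length) ∧
  ∀ i < n.length, ∀ j < n.length, (mget n i j = 0 ↔ mget n j i = 0)
instance (n : List (List Int)) : Decidable (Pre_kirch_to_incident n) := by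
  unfold Pre_kirch_to_incident; infer_instance

def pvWitness_kirch_to_incident : List (List Int) := [[0, 1, 1], [1, 0, 0], [1, 0, 0]]

def Spec_kirch_to_incident (n : List (List Int)) (out : List (List Int)) : Prop := out = kirch_to_incident_alt n
instance (n : List (List Int)) (out : List (List Int)) : Decidable (Spec_kirch_to_incident n out) := by unfold Spec_kirch_to_incident; infer_instance

-- ===== CLAIM (what is proved, stated in full; the proofs are below) =====
def Claim_equal_kirch_to_incident : Prop := ∀ (n : List (List Int)), Dom_kirch_to_incident n → Pre_kirch_to_incident n → Spec_kirch_to_incident n (kirch_to_incident n)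

-- ===== LEMMAS AND PROOFS =====

-- row-major list of all index pairs, and the row-major (lexicographic) order on them
def pairs (b : Nat) : List (Nat × Nat) :=
  (List.range b).flatMap (fun i => (List.range b).map (fun j => (i, j)))

def rmLt (p q : Nat × Nat) : Prop := p.1 < q.1 ∨ (p.1 = q.1 ∧ p.2 < q.2)

def edgeB (n : List (List Int)) (p : Nat × Nat) : Bool :=
  decide (p.1 < p.2 ∧ mget n p.1 p.2 ≠ 0)

-- A's marking loop, abstracted: set column r of rows p.1 and p.2 to 1 for successive r
def mark (x : List (List Int)) (r : Nat) : List (Nat × Nat) → List (List Int)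
  | [] => x
  | p :: es => mark (mset (mset x p.1 r 1) p.2 r 1) (r + 1) es

lemma nested_foldl {S : Type} (f : S → Nat → Nat → S) (s0 : S) (b : Nat) :
    (List.range b).foldl (fun s i => (List.range b).foldl (fun s j => f s i j) s) s0
      = (pairs b).foldl (fun s p => f s p.1 p.2) s0 := by
  simp [pairs, List.foldl_flatMap, List.foldl_map]

lemma mem_pairs {b : Nat} {p : Nat × Nat} : p ∈ pairs b ↔ p.1 < b ∧ p.2 < b := by
  cases p with
  | mk i j =>
      simp only [pairs, List.mem_flatMap, List.mem_map, List.mem_range]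
      constructor
      · rintro ⟨a, ha, c, hc, h⟩
        cases h
        exact ⟨ha, hc⟩
      · rintro ⟨h1, h2⟩
        exact ⟨i, h1, j, h2, rfl⟩

lemma pairwise_pairs (b : Nat) : (pairs b).Pairwise rmLt := by
  unfold pairs
  rw [List.pairwise_flatMap]
  constructor
  · intro a _
    rw [List.pairwise_map]
    exact (List.pairwise_lt_range).imp (fun h => Or.inr ⟨rfl, h⟩)
  · refine (List.pairwise_lt_range).imp ?_
    intro i1 i2 h x hx y hy
    simp only [List.mem_map] at hx hy
    obtain ⟨j1, _, rfl⟩ := hx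
    obtain ⟨j2, _, rfl⟩ := hy
    exact Or.inl h

lemma nodup_pairs (b : Nat) : (pairs b).Nodup :=
  (pairwise_pairs b).imp (fun h => by rintro rfl; unfold rmLt at h; omega)

lemma prefix_mem_iff {α : Type} {R : α → α → Prop} {P L Rst : List α} {a : α}
    (hP : P = L ++ a :: Rst) (hpw : P.Pairwise R)
    (hirr : ∀ x, ¬ R x x) (hasym : ∀ x y, R x y → ¬ R y x) :
    ∀ x, x ∈ L ↔ x ∈ P ∧ R x a := by
  subst hP
  rw [List.pairwise_append] at hpw
  obtain ⟨_, hpw2, hcross⟩ := hpw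
  intro x
  constructor
  · intro hx
    exact ⟨List.mem_append_left _ hx, hcross x hx a (List.mem_cons_self)⟩
  · rintro ⟨hx, hR⟩
    rcases List.mem_append.1 hx with h | h
    · exact h
    · rcases List.mem_cons.1 h with rfl | h
      · exact absurd hR (hirr x)
      · exact absurd hR (hasym _ _ ((List.pairwise_cons.1 hpw2).1 x h))

lemma foldl_inv {α S : Type} (f : S → α → S) (I : List α → S → Prop) (P : List α)
    (hstep : ∀ L a Rst s, P = L ++ a :: Rst → I L s → I (L ++ [a]) (f s a)) :
    ∀ (rest L : List α) (s : S), P = L ++ rest → I L s → I P (rest.foldl f s) := by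
  intro rest
  induction rest with
  | nil => intro L s h hI; rw [List.append_nil] at h; subst h; exact hI
  | cons a rest ih =>
      intro L s h hI
      exact ih (L ++ [a]) (f s a) (by simpa using h) (hstep L a rest s h hI)

lemma length_mset (m : List (List Int)) (i j : Nat) (v : Int) :
    (mset m i j v).length = m.length := by simp [mset]

lemma getD_mem {m : List (List Int)} {i : Nat} (hi : i < m.length) :
    m.getD i [] ∈ m := by
  rw [List.getD_eq_getElem?_getD, List.getElem?_eq_getElem hi]
  exact List.getElem_mem hi

lemma rows_mset {m : List (List Int)} {k i j : Nat} {v : Int}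
    (hi : i < m.length) (h : ∀ row ∈ m, k ≤ row.length) :
    ∀ row ∈ mset m i j v, k ≤ row.length := by
  intro row hr
  rcases List.mem_or_eq_of_mem_set hr with h' | rfl
  · exact h row h'
  · rw [List.length_set]; exact h _ (getD_mem hi)

lemma mget_mset {m : List (List Int)} {i j : Nat} (v : Int)
    (hi : i < m.length) (hj : j < (m.getD i []).length) (p q : Nat) :
    mget (mset m i j v) p q = if p = i ∧ q = j then v else mget m p q := by
  unfold mget mset
  by_cases hp : p = i
  · subst hp
    have hrow : (m.set p ((m.getD p []).set j v)).getD p [] = (m.getD p []).set j v := by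
      simp [List.getD_eq_getElem?_getD, List.getElem?_set_self hi]
    rw [hrow]
    by_cases hq : q = j
    · subst hq
      simp [List.getD_eq_getElem?_getD,
        List.getElem?_set_self (show q < (m[p]?.getD (α := List Int) []).length from hj)]
    · rw [List.getD_eq_getElem?_getD, List.getElem?_set_ne (fun h => hq h.symm),
          if_neg (by tauto)]
      rfl
  · have hrow : (m.set i ((m.getD i []).set j v)).getD p [] = m.getD p [] := by
      simp [List.getD_eq_getElem?_getD, List.getElem?_set_ne (fun h : i = p => hp h.symm)]
    rw [hrow, if_neg (by tauto)]

lemma mset_comm {m : List (List Int)} {i j i' j' : Nat} {v v' : Int} (h : i ≠ i') :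
    mset (mset m i j v) i' j' v' = mset (mset m i' j' v') i j v := by
  unfold mset
  rw [show (m.set i ((m.getD i []).set j v)).getD i' [] = m.getD i' [] from by
        simp [List.getD_eq_getElem?_getD, List.getElem?_set_ne h],
      show (m.set i' ((m.getD i' []).set j' v')).getD i [] = m.getD i [] from by
        simp [List.getD_eq_getElem?_getD, List.getElem?_set_ne (Ne.symm h)],
      List.set_comm _ _ h]

lemma mark_singleton (x : List (List Int)) (r : Nat) (p : Nat × Nat) :
    mark x r [p] = mset (mset x p.1 r 1) p.2 r 1 := rfl

lemma mark_append (es es' : List (Nat × Nat)) :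
    ∀ (x : List (List Int)) (r : Nat),
      mark x r (es ++ es') = mark (mark x r es) (r + es.length) es' := by
  induction es with
  | nil => intro x r; simp [mark]
  | cons p es ih =>
      intro x r
      simp only [List.cons_append, mark, ih, List.length_cons]
      ring_nf

lemma count_foldl_nat {α : Type} (P : α → Prop) [DecidablePred P] (l : List α) :
    ∀ k : Nat, l.foldl (fun a x => if P x then a + 1 else a) k
        = k + l.countP (fun x => decide (P x)) := by
  induction l with
  | nil => intro k; simp
  | cons x l ih =>
      intro k
      by_cases h : P x <;> simp [h, ih] <;> omega

lemma countP_split {α : Type} (p q r : α → Bool) (l : List α)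
    (h : ∀ x ∈ l, p x = (q x || r x) ∧ ¬(q x = true ∧ r x = true)) :
    l.countP p = l.countP q + l.countP r := by
  induction l with
  | nil => simp
  | cons x l ih =>
      obtain ⟨h1, h2⟩ := h x (List.mem_cons_self)
      have := ih (fun y hy => h y (List.mem_cons_of_mem x hy))
      simp only [List.countP_cons, h1]
      cases hq : q x <;> cases hr : r x <;> simp_all <;> omega

lemma swap_perm (b : Nat) : ((pairs b).map Prod.swap).Perm (pairs b) := by
  rw [List.perm_ext_iff_of_nodup ((nodup_pairs b).map Prod.swap_injective) (nodup_pairs b)]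
  intro a
  simp only [List.mem_map, mem_pairs]
  constructor
  · rintro ⟨p, ⟨h1, h2⟩, rfl⟩; exact ⟨h2, h1⟩
  · rintro ⟨h1, h2⟩; exact ⟨a.swap, ⟨h2, h1⟩, by simp⟩

-- the invariant of A's second double loop, indexed by the consumed prefix L of `pairs n.length`
def AInv (n : List (List Int)) (x0 : List (List Int)) (L : List (Nat × Nat))
    (s : List (List Int) × List (List Int) × Nat) : Prop :=
  s.2.1.length = n.length ∧
  (∀ row ∈ s.2.1, n.length ≤ row.length) ∧
  (∀ p q : Nat, mget s.2.1 p q =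
      if p ≠ q ∧ mget n p q ≠ 0 ∧ ((p, q) ∈ L ∨ (q, p) ∈ L) then 0 else mget n p q) ∧
  s.2.2 = (L.filter (edgeB n)).length ∧
  s.1 = mark x0 0 (L.filter (edgeB n))

lemma rmLt_irrefl : ∀ x : Nat × Nat, ¬ rmLt x x := by
  intro x; unfold rmLt; omega

lemma rmLt_asymm : ∀ x y : Nat × Nat, rmLt x y → ¬ rmLt y x := by
  intro x y; unfold rmLt; omega

lemma step_preserve (n : List (List Int)) (x0 : List (List Int))
    (hsym : ∀ i < n.length, ∀ j < n.length, (mget n i j = 0 ↔ mget n j i = 0)) :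
    ∀ L a Rst s, pairs n.length = L ++ a :: Rst → AInv n x0 L s →
      AInv n x0 (L ++ [a])
        ((fun (s : List (List Int) × List (List Int) × Nat) (p : Nat × Nat) =>
          if mget s.2.1 p.1 p.2 ≠ 0 ∧ p.1 ≠ p.2 then
            (mset (mset s.1 p.2 s.2.2 1) p.1 s.2.2 1,
             mset (mset s.2.1 p.1 p.2 0) p.2 p.1 0, s.2.2 + 1)
          else s) s a) := by
  intro L a Rst s hP hI
  obtain ⟨hlen, hrows, hn, hr, hx⟩ := hI
  obtain ⟨x, cur, r⟩ := s
  simp only at hlen hrows hn hr hx ⊢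
  have hmemL := prefix_mem_iff hP (pairwise_pairs n.length) rmLt_irrefl rmLt_asymm
  have haP : a ∈ pairs n.length := hP ▸ List.mem_append_right _ (List.mem_cons_self)
  have ha1 : a.1 < n.length := (mem_pairs.1 haP).1
  have ha2 : a.2 < n.length := (mem_pairs.1 haP).2
  have hanotL : a ∉ L := fun h => rmLt_irrefl a ((hmemL a).1 h).2
  have hmem' : ∀ u v : Nat, (u, v) ∈ L ++ [a] ↔ (u, v) ∈ L ∨ (u = a.1 ∧ v = a.2) := by
    intro u v
    simp [Prod.ext_iff]
  by_cases hfire : mget cur a.1 a.2 ≠ 0 ∧ a.1 ≠ a.2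
  · -- the branch fires
    rw [if_pos hfire]
    obtain ⟨hnz, hne⟩ := hfire
    have hcur := hn a.1 a.2
    have horig : mget n a.1 a.2 ≠ 0 := by
      by_contra h0
      rw [if_neg (by tauto)] at hcur
      exact hnz (hcur.trans (not_not.1 (by tauto)))
    have hnotmem : ¬ ((a.1, a.2) ∈ L ∨ (a.2, a.1) ∈ L) := by
      intro h
      rw [if_pos ⟨hne, horig, h⟩] at hcur
      exact hnz hcur
    have hlt : a.1 < a.2 := by
      rcases Nat.lt_or_ge a.1 a.2 with h | h
      · exact h
      · exfalso
        exact hnotmem (Or.inr ((hmemL (a.2, a.1)).2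
          ⟨mem_pairs.2 ⟨ha2, ha1⟩, Or.inl (show a.2 < a.1 by omega)⟩))
    have horig' : mget n a.2 a.1 ≠ 0 := fun h0 => horig ((hsym a.1 ha1 a.2 ha2).2 h0)
    have hedge : edgeB n a = true := decide_eq_true ⟨hlt, horig⟩
    have hrowlen : ∀ i < n.length, a.2 < (cur.getD i []).length ∧ a.1 < (cur.getD i []).length := by
      intro i hi
      have := hrows _ (getD_mem (m := cur) (i := i) (by omega))
      omega
    have hlen1 : (mset cur a.1 a.2 0).length = cur.length := length_mset ..
    have hget1 := mget_mset (m := cur) (i := a.1) (j := a.2) 0 (by omega) (hrowlen a.1 ha1).1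
    have hget2 := mget_mset (m := mset cur a.1 a.2 0) (i := a.2) (j := a.1) 0
        (by rw [hlen1]; omega)
        (by
          rcases eq_or_ne a.2 a.1 with h | h
          · omega
          · rw [show (mset cur a.1 a.2 0).getD a.2 [] = cur.getD a.2 [] from by
              unfold mset
              simp [List.getD_eq_getElem?_getD, List.getElem?_set_ne (Ne.symm h)]]
            exact (hrowlen a.2 ha2).2)
    refine ⟨by simp [length_mset, hlen], ?_, ?_, ?_, ?_⟩
    · exact rows_mset (by rw [hlen1]; omega) (rows_mset (by omega) hrows)
    · intro p q
      rw [hget2, hget1, hn p q]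
      by_cases h1 : p = a.2 ∧ q = a.1
      · obtain ⟨rfl, rfl⟩ := h1
        rw [if_pos ⟨rfl, rfl⟩,
            if_pos ⟨Ne.symm hne, horig', Or.inr ((hmem' a.1 a.2).2 (Or.inr ⟨rfl, rfl⟩))⟩]
      · by_cases h2 : p = a.1 ∧ q = a.2
        · obtain ⟨rfl, rfl⟩ := h2
          rw [if_neg h1, if_pos ⟨rfl, rfl⟩,
              if_pos ⟨hne, horig, Or.inl ((hmem' a.1 a.2).2 (Or.inr ⟨rfl, rfl⟩))⟩]
        · rw [if_neg h1, if_neg h2]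
          refine if_congr (Iff.symm ?_) rfl rfl
          rw [hmem', hmem']
          constructor
          · rintro ⟨hpq, hz, hm⟩
            refine ⟨hpq, hz, ?_⟩
            rcases hm with (hm | hm) | (hm | hm)
            · exact Or.inl hm
            · exact absurd hm h2
            · exact Or.inr hm
            · exact absurd ⟨hm.2, hm.1⟩ h1
          · rintro ⟨hpq, hz, hm⟩
            exact ⟨hpq, hz, by tauto⟩
    · rw [List.filter_append, List.filter_cons, hedge]
      simp [hr]
    · have hfilter : List.filter (edgeB n) (L ++ [a]) = List.filter (edgeB n) L ++ [a] := by
        simp [List.filter_append, hedge]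
      rw [hfilter, mark_append, mark_singleton, Nat.zero_add, ← hr, hx]
      exact mset_comm (Ne.symm hne)
  · -- the branch does not fire: the state is unchanged
    rw [if_neg hfire]
    have hnofire : mget cur a.1 a.2 = 0 ∨ a.1 = a.2 := by tauto
    have hCL : ∀ p q : Nat,
        (p ≠ q ∧ mget n p q ≠ 0 ∧ ((p, q) ∈ L ++ [a] ∨ (q, p) ∈ L ++ [a])) ↔
        (p ≠ q ∧ mget n p q ≠ 0 ∧ ((p, q) ∈ L ∨ (q, p) ∈ L)) := by
      intro p q
      rw [hmem', hmem']
      constructor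
      · rintro ⟨hpq, hz, hm⟩
        refine ⟨hpq, hz, ?_⟩
        rcases hm with (hm | hm) | (hm | hm)
        · exact Or.inl hm
        · obtain ⟨rfl, rfl⟩ := hm
          have h0 : mget cur a.1 a.2 = 0 := by tauto
          have hcur := (hn a.1 a.2).symm.trans h0
          by_cases hmem : (a.1, a.2) ∈ L ∨ (a.2, a.1) ∈ L
          · rcases hmem with hm' | hm'
            · exact Or.inl hm'
            · exact Or.inr hm'
          · rw [if_neg (by tauto)] at hcur
            exact absurd hcur hz
        · exact Or.inr hm
        · obtain ⟨rfl, rfl⟩ := hm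
          have hz' : mget n a.1 a.2 ≠ 0 := fun h0 => hz ((hsym a.1 ha1 a.2 ha2).1 h0)
          have h0 : mget cur a.1 a.2 = 0 := by tauto
          have hcur := (hn a.1 a.2).symm.trans h0
          by_cases hmem : (a.1, a.2) ∈ L ∨ (a.2, a.1) ∈ L
          · rcases hmem with hm' | hm'
            · exact Or.inr hm'
            · exact Or.inl hm'
          · rw [if_neg (by tauto)] at hcur
            exact absurd hcur hz'
      · rintro ⟨hpq, hz, hm⟩
        exact ⟨hpq, hz, by tauto⟩
    have hnoedge : edgeB n a = false := by
      unfold edgeB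
      rw [decide_eq_false_iff_not]
      rintro ⟨hlt, horig⟩
      have hne : a.1 ≠ a.2 := by omega
      have h0 : mget cur a.1 a.2 = 0 := by tauto
      have hcur := (hn a.1 a.2).symm.trans h0
      by_cases hmem : (a.1, a.2) ∈ L ∨ (a.2, a.1) ∈ L
      · rcases hmem with h | h
        · exact hanotL (by simpa using h)
        · have := ((hmemL (a.2, a.1)).1 h).2
          unfold rmLt at this
          simp only at this
          omega
      · rw [if_neg (by tauto)] at hcur
        exact horig hcur
    refine ⟨hlen, hrows, ?_, ?_, ?_⟩
    · intro p q
      rw [hn p q]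
      exact (if_congr (hCL p q) rfl rfl).symm
    · rw [List.filter_append, List.filter_cons, hnoedge]
      simpa using hr
    · rw [List.filter_append, List.filter_cons, hnoedge]
      simpa using hx

lemma range'_eq_filter (i : Nat) : ∀ b : Nat,
    List.range' (i + 1) (b - (i + 1)) = (List.range b).filter (fun j => decide (i < j)) := by
  intro b
  induction b with
  | zero => simp
  | succ b ih =>
      rw [List.range_succ, List.filter_append]
      by_cases h : i < b
      · rw [show b + 1 - (i + 1) = (b - (i + 1)) + 1 by omega, List.range'_concat,
            show i + 1 + 1 * (b - (i + 1)) = b from by omega, ih]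
        simp [h]
      · rw [show b + 1 - (i + 1) = b - (i + 1) by omega, ih]
        simp [h]

lemma edges_alt_eq (n : List (List Int)) :
    (List.range n.length).flatMap (fun i =>
        ((List.range' (i + 1) (n.length - (i + 1))).filter (fun j => decide (mget n i j ≠ 0))).map
          (fun j => (i, j)))
      = (pairs n.length).filter (edgeB n) := by
  unfold pairs
  rw [List.filter_flatMap]
  congr 1
  funext i
  rw [List.filter_map, range'_eq_filter, List.filter_filter]
  congr 1
  refine List.filter_congr ?_
  intro j _
  simp [edgeB, Function.comp, Bool.and_comm]

-- B's matrix as a pointwise formula equals A's marking loop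
lemma set_append_self (l1 l2 : List Int) (v : Int) :
    (l1 ++ l2).set l1.length v = l1 ++ l2.set 0 v := by
  induction l1 with
  | nil => rfl
  | cons x l1 ih => simp [ih]

lemma mset_map_range (g : Nat → List Int) {b i : Nat} (hi : i < b) (j : Nat) (v : Int) :
    mset ((List.range b).map g) i j v
      = (List.range b).map (fun k => if k = i then (g i).set j v else g k) := by
  unfold mset
  have hget : ((List.range b).map g).getD i [] = g i := by
    simp [List.getD_eq_getElem?_getD, hi]
  rw [hget]
  apply List.ext_getElem
  · simp
  · intro k hk1 hk2
    simp only [List.length_set, List.length_map, List.length_range] at hk1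
    rw [List.getElem_set]
    simp only [List.getElem_map, List.getElem_range]
    by_cases h : i = k
    · subst h
      simp
    · rw [if_neg h, if_neg (fun h' => h h'.symm)]

lemma mark_formula (b : Nat) : ∀ (es : List (Nat × Nat)) (r : Nat) (f : Nat → List Int),
    (∀ p ∈ es, p.1 < b ∧ p.2 < b ∧ p.1 ≠ p.2) → (∀ v, (f v).length = r) →
    mark ((List.range b).map (fun v => f v ++ List.replicate es.length 0)) r es
      = (List.range b).map (fun v =>
          f v ++ es.map (fun p => if v = p.1 ∨ v = p.2 then (1 : Int) else 0)) := by
  intro es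
  induction es with
  | nil => intro r f _ _; simp [mark]
  | cons p es ih =>
      intro r f hall hf
      obtain ⟨hp1, hp2, hne⟩ := hall p (List.mem_cons_self)
      simp only [mark, List.length_cons]
      have hstate :
          mset (mset ((List.range b).map
              (fun v => f v ++ List.replicate (es.length + 1) 0)) p.1 r 1) p.2 r 1
            = (List.range b).map (fun v =>
                (f v ++ [if v = p.1 ∨ v = p.2 then (1 : Int) else 0])
                  ++ List.replicate es.length 0) := by
        rw [mset_map_range _ hp1, mset_map_range _ hp2]
        apply List.map_congr_left
        intro k _
        have hrep : List.replicate (es.length + 1) (0 : Int) = 0 :: List.replicate es.length 0 := rfl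
        by_cases h2 : k = p.2
        · subst h2
          rw [if_pos rfl, if_neg hne.symm, hrep, ← hf p.2, set_append_self]
          simp [hne.symm]
        · rw [if_neg h2]
          by_cases h1 : k = p.1
          · subst h1
            rw [if_pos rfl, hrep, ← hf p.1, set_append_self]
            simp
          · rw [if_neg h1, hrep]
            simp [h1, h2]
      rw [hstate, ih (r + 1) (fun v => f v ++ [if v = p.1 ∨ v = p.2 then (1 : Int) else 0])
            (fun q hq => hall q (List.mem_cons_of_mem _ hq))
            (by intro v; simp [hf v])]
      apply List.map_congr_left
      intro k _
      simp

lemma count_eq_twice (n : List (List Int))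
    (hsym : ∀ i < n.length, ∀ j < n.length, (mget n i j = 0 ↔ mget n j i = 0)) :
    (pairs n.length).countP (fun p => decide (p.1 ≠ p.2 ∧ mget n p.1 p.2 ≠ 0))
      = 2 * (pairs n.length).countP (edgeB n) := by
  have hsplit := countP_split
      (fun p : Nat × Nat => decide (p.1 ≠ p.2 ∧ mget n p.1 p.2 ≠ 0))
      (edgeB n)
      (fun p : Nat × Nat => decide (p.2 < p.1 ∧ mget n p.1 p.2 ≠ 0))
      (pairs n.length)
      (by
        intro x _
        unfold edgeB
        constructor
        · rcases Nat.lt_trichotomy x.1 x.2 with h | h | h <;>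
            by_cases hz : mget n x.1 x.2 = 0 <;>
            simp [h, hz] <;> omega
        · rintro ⟨h1, h2⟩
          have := of_decide_eq_true h1
          have := of_decide_eq_true h2
          omega)
  rw [hsplit]
  have hlo : (pairs n.length).countP (fun p : Nat × Nat => decide (p.2 < p.1 ∧ mget n p.1 p.2 ≠ 0))
      = (pairs n.length).countP (edgeB n) := by
    conv_rhs => rw [← (swap_perm n.length).countP_eq]
    rw [List.countP_map]
    refine List.countP_congr ?_
    intro x hx
    obtain ⟨h1, h2⟩ := mem_pairs.1 hx
    unfold edgeB
    simp only [Function.comp, Prod.fst_swap, Prod.snd_swap, decide_eq_true_eq]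
    constructor
    · rintro ⟨h, hz⟩
      exact ⟨h, fun h0 => hz ((hsym x.2 h2 x.1 h1).1 h0)⟩
    · rintro ⟨h, hz⟩
      exact ⟨h, fun h0 => hz ((hsym x.1 h1 x.2 h2).1 h0)⟩
  omega

-- ===== VERDICT (by name: the statement is the Claim_ definition above) =====
theorem kirch_to_incident_spec : Claim_equal_kirch_to_incident := by
  intro n _ hpre
  obtain ⟨hsq, hsym⟩ := hpre
  unfold Spec_kirch_to_incident kirch_to_incident kirch_to_incident_alt
  simp only [edges_alt_eq n]
  rw [nested_foldl, nested_foldl]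
  rw [count_foldl_nat (fun p : Nat × Nat => p.1 ≠ p.2 ∧ mget n p.1 p.2 ≠ 0) (pairs n.length),
      Nat.zero_add, count_eq_twice n hsym, Nat.mul_div_cancel_left _ (by norm_num),
      List.countP_eq_length_filter]
  set E := (pairs n.length).filter (edgeB n) with hE
  have hallE : ∀ p ∈ E, p.1 < n.length ∧ p.2 < n.length ∧ p.1 ≠ p.2 := by
    intro p hp
    rw [hE, List.mem_filter] at hp
    obtain ⟨hmem, hb⟩ := hp
    obtain ⟨h1, h2⟩ := mem_pairs.1 hmem
    have := of_decide_eq_true hb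
    exact ⟨h1, h2, by omega⟩
  have hx0 : List.replicate n.length (List.replicate E.length (0 : Int))
      = (List.range n.length).map (fun v => ([] : List Int) ++ List.replicate E.length 0) := by
    simp [List.map_const']
  have hbase : AInv n (List.replicate n.length (List.replicate E.length 0))
      [] ((List.replicate n.length (List.replicate E.length 0)), n, 0) := by
    refine ⟨rfl, hsq, ?_, by simp, by simp [mark]⟩
    intro p q
    simp
  have hInv := foldl_inv _ (AInv n (List.replicate n.length (List.replicate E.length 0)))
      (pairs n.length)
      (step_preserve n _ hsym)
      (pairs n.length) [] _ (by simp) hbase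
  rw [hInv.2.2.2.2, hx0, mark_formula n.length E 0 (fun _ => []) hallE (fun _ => rfl)]
  simp
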